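-- pv_equiv track=rewrite | github.com/cirosantilli/project-euler-solvers | solvers/380.py | _det_bareiss
-- ===== SOURCE A (Python) =====
-- def _det_bareiss(mat):
--     """
--     Fraction-free determinant (Bareiss algorithm), exact for integer matrices.
--
--     For the small test cases in this problem, this is fast and avoids any
--     floating-point issues.
--     """
--     n = len(mat)
--     if n == 0:
--         return 1
--     A = [row[:] for row in mat]
--     sign = 1
--     prev = 1
--
--     for k in range(n - 1):
--         # Ensure a non-zero pivot at A[k][k] using row/column swaps if needed.
--         if A[k][k] == 0:
--             pivot_row = None
--             for i in range(k + 1, n):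
--                 if A[i][k] != 0:
--                     pivot_row = i
--                     break
--             if pivot_row is not None:
--                 A[k], A[pivot_row] = A[pivot_row], A[k]
--                 sign *= -1
--             else:
--                 pivot_col = None
--                 for j in range(k + 1, n):
--                     if A[k][j] != 0:
--                         pivot_col = j
--                         break
--                 if pivot_col is None:
--                     return 0
--                 for r in range(n):
--                     A[r][k], A[r][pivot_col] = A[r][pivot_col], A[r][k]
--                 sign *= -1
--
--         pivot = A[k][k]
--         for i in range(k + 1, n):
--             for j in range(k + 1, n):
--                 A[i][j] = A[i][j] * pivot - A[i][k] * A[k][j]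
--                 if k > 0:
--                     A[i][j] //= prev
--             A[i][k] = 0
--
--         for j in range(k + 1, n):
--             A[k][j] = 0
--
--         prev = pivot
--
--     return sign * A[n - 1][n - 1]
-- ===== SOURCE B (Python) =====
-- def _det_bareiss(mat):
--     """Exact integer determinant by first-row Laplace expansion, carried out
--     on an explicit list of remaining column indices (no matrix copies)."""
--     n = len(mat)
--
--     def expand(i, cols):
--         if not cols:
--             return 1
--
--         def scan(sign, pre, post):
--             if not post:
--                 return 0
--             c, rest = post[0], post[1:]
--             return (sign * mat[i][c] * expand(i + 1, pre + rest)
--                     + scan(-sign, pre + [c], rest))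
--
--         return scan(1, [], cols)
--
--     return expand(0, list(range(n)))
-- ===== Notes on version B (the rewrite author's own statement) =====
-- stated objective: alternative
-- what changed: Replaces fraction-free Bareiss elimination (pivot swaps, in-place updates, exact floor divisions) with recursive first-row Laplace expansion over an explicit list of remaining column indices.
-- outside the precondition, e.g. on _det_bareiss([[0, 0], [0]]): A returns 0, B raises IndexError
import Mathlib
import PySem

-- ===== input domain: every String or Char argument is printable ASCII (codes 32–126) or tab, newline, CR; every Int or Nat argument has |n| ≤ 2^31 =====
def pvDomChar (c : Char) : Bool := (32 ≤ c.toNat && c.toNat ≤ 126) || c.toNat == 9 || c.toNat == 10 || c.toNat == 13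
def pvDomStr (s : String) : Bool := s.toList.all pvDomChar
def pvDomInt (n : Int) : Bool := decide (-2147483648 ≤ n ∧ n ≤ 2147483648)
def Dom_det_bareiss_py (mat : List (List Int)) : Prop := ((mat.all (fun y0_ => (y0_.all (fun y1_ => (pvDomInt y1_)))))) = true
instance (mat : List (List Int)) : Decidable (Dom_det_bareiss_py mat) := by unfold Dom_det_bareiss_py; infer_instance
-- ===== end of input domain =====

-- B replaces Bareiss fraction-free elimination by recursive first-row Laplace expansion
-- over a list of remaining column indices (alternative algorithm, not faster).

-- ===== PORT A =====
-- A[i][j] read/write on the list-of-lists state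
def pvGetE (A : List (List Int)) (i j : Nat) : Int := (A.getD i []).getD j 0
def pvSetE (A : List (List Int)) (i j : Nat) (v : Int) : List (List Int) :=
  A.set i ((A.getD i []).set j v)
-- A[k], A[i] = A[i], A[k]
def pvSwapRows (A : List (List Int)) (i j : Nat) : List (List Int) :=
  (A.set i (A.getD j [])).set j (A.getD i [])
-- for r in range(n): A[r][c1], A[r][c2] = A[r][c2], A[r][c1]
def pvSwapCols (A : List (List Int)) (n c1 c2 : Nat) : List (List Int) :=
  (List.range n).foldl (fun B r =>
    pvSetE (pvSetE B r c1 (pvGetE B r c2)) r c2 (pvGetE B r c1)) A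
-- the double elimination loop, including "A[i][k] = 0"
def pvElim (A : List (List Int)) (n k : Nat) (pivot prev : Int) : List (List Int) :=
  (List.range' (k+1) (n-(k+1))).foldl (fun B i =>
    pvSetE ((List.range' (k+1) (n-(k+1))).foldl (fun C j =>
        pvSetE C i j
          (if 0 < k then
            PySem.Int.floordiv (pvGetE C i j * pivot - pvGetE C i k * pvGetE C k j) prev
           else pvGetE C i j * pivot - pvGetE C i k * pvGetE C k j)) B)
      i k 0) A
-- for j in range(k+1, n): A[k][j] = 0
def pvZeroRow (A : List (List Int)) (n k : Nat) : List (List Int) :=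
  (List.range' (k+1) (n-(k+1))).foldl (fun B j => pvSetE B k j 0) A

-- the "for k in range(n-1)" loop with its early "return 0"
def detLoop (n k : Nat) (A : List (List Int)) (sign prev : Int) : Int :=
  if hk : k < n - 1 then
    if pvGetE A k k = 0 then
      match (List.range' (k+1) (n-(k+1))).find? (fun i => pvGetE A i k != 0) with
      | some i =>
          detLoop n (k+1)
            (pvZeroRow (pvElim (pvSwapRows A k i) n k (pvGetE (pvSwapRows A k i) k k) prev) n k)
            (-sign) (pvGetE (pvSwapRows A k i) k k)
      | none =>
        match (List.range' (k+1) (n-(k+1))).find? (fun j => pvGetE A k j != 0) with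
        | some c =>
            detLoop n (k+1)
              (pvZeroRow (pvElim (pvSwapCols A n k c) n k (pvGetE (pvSwapCols A n k c) k k) prev) n k)
              (-sign) (pvGetE (pvSwapCols A n k c) k k)
        | none => 0
    else
      detLoop n (k+1) (pvZeroRow (pvElim A n k (pvGetE A k k) prev) n k)
        sign (pvGetE A k k)
  else sign * pvGetE A (n-1) (n-1)
termination_by n - 1 - k
decreasing_by all_goals omega

def det_bareiss_py (mat : List (List Int)) : Int :=
  if mat.length = 0 then 1
  else detLoop mat.length 0 (mat.map (fun row => row)) 1 1

-- ===== PORT B =====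
mutual
-- expand(i, cols): Laplace expansion of the rows from i over the columns in cols
def expandB (mat : List (List Int)) (i : Nat) (cols : List Nat) : Int :=
  match cols with
  | [] => 1
  | c :: rest => scanB mat i 1 [] (c :: rest)
termination_by (cols.length, cols.length + 1)
decreasing_by simp; omega
-- scan(sign, pre, post)
def scanB (mat : List (List Int)) (i : Nat) (sign : Int) (pre post : List Nat) : Int :=
  match post with
  | [] => 0
  | c :: rest =>
      sign * pvGetE mat i c * expandB mat (i+1) (pre ++ rest)
        + scanB mat i (-sign) (pre ++ [c]) rest
termination_by (pre.length + post.length, post.length)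
decreasing_by all_goals simp [List.length_append]; omega
end

def det_bareiss_py_alt (mat : List (List Int)) : Int :=
  expandB mat 0 (List.range mat.length)

-- ===== PRECONDITION & SPEC =====
-- Pre_ requires every row to have length ≥ len(mat): on shorter rows A raises IndexError,
-- except in a degenerate all-zero corner where A happens to return 0 before ever touching
-- the short row; B's expansion reads that row and raises IndexError there.
def Pre_det_bareiss_py (mat : List (List Int)) : Prop :=
  ∀ row ∈ mat, mat.length ≤ row.length
instance (mat : List (List Int)) : Decidable (Pre_det_bareiss_py mat) := by
  unfold Pre_det_bareiss_py; infer_instance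
def pvWitness_det_bareiss_py : List (List Int) := [[1, 2], [3, 4]]

def Spec_det_bareiss_py (mat : List (List Int)) (out : Int) : Prop := out = det_bareiss_py_alt mat
instance (mat : List (List Int)) (out : Int) : Decidable (Spec_det_bareiss_py mat out) := by unfold Spec_det_bareiss_py; infer_instance

-- ===== CLAIM (what is proved, stated in full; the proofs are below) =====
def Claim_equal_det_bareiss_py : Prop := ∀ (mat : List (List Int)), Dom_det_bareiss_py mat → Pre_det_bareiss_py mat → Spec_det_bareiss_py mat (det_bareiss_py mat)

-- ===== LEMMAS AND PROOFS =====


def chioM {m : ℕ} (S : Matrix (Fin (m+1)) (Fin (m+1)) ℤ) : Matrix (Fin m) (Fin m) ℤ :=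
  fun i j => S 0 0 * S i.succ j.succ - S i.succ 0 * S 0 j.succ

theorem chio_det {m : ℕ} (S : Matrix (Fin (m+1)) (Fin (m+1)) ℤ) :
    S 0 0 * (chioM S).det = (S 0 0) ^ m * S.det := by
  set L : Matrix (Fin (m+1)) (Fin (m+1)) ℤ :=
    fun i j => if i = 0 then (if j = 0 then 1 else 0)
      else if j = 0 then -(S i 0) else if i = j then S 0 0 else 0 with hL
  have hM : ∀ i j, (L * S) i j =
      if i = 0 then S 0 j else S 0 0 * S i j - S i 0 * S 0 j := by
    intro i j
    rw [Matrix.mul_apply]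
    by_cases hi : i = 0
    · subst hi
      rw [Finset.sum_eq_single 0]
      · simp [hL]
      · intro x _ hx; simp [hL, hx]
      · simp
    · obtain ⟨a, rfl⟩ : ∃ a : Fin m, a.succ = i := Fin.exists_succ_eq.mpr hi
      rw [Fin.sum_univ_succ]
      rw [Finset.sum_eq_single a]
      · simp [hL, Fin.succ_ne_zero]; ring
      · intro x _ hxa
        simp [hL, Fin.succ_ne_zero, Fin.succ_inj, Ne.symm hxa]
      · simp
  have hdetL : L.det = (S 0 0) ^ m := by
    rw [Matrix.det_succ_row_zero]
    rw [Finset.sum_eq_single 0]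
    · have : (L.submatrix Fin.succ (Fin.succAbove 0)) = Matrix.diagonal (fun _ => S 0 0) := by
        funext a b
        simp only [Matrix.submatrix_apply, Fin.succAbove_zero, hL, Matrix.diagonal]
        by_cases h : a = b
        · simp [Fin.succ_ne_zero, h]
        · simp [Fin.succ_ne_zero, h, Fin.succ_inj]
      rw [this, Matrix.det_diagonal]
      simp [hL]
    · intro x _ hx; simp [hL, hx]
    · simp
  have hdetM : (L * S).det = S 0 0 * (chioM S).det := by
    rw [Matrix.det_succ_column_zero]
    rw [Finset.sum_eq_single 0]
    · have : ((L * S).submatrix (Fin.succAbove 0) Fin.succ) = chioM S := by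
        funext a b
        simp only [Matrix.submatrix_apply, Fin.succAbove_zero]
        rw [hM]
        simp [Fin.succ_ne_zero, chioM]
      rw [this, hM]
      simp
    · intro x _ hx
      have h0 : (L * S) x 0 = 0 := by rw [hM]; simp [hx]; ring
      simp [h0]
    · simp
  have := Matrix.det_mul L S
  rw [hdetM, hdetL] at this
  linarith [this]

def DvdInv (m : ℕ) (S : Matrix (Fin m) (Fin m) ℤ) (p : ℤ) : Prop :=
  ∀ (r : ℕ) (f g : Fin r → Fin m), Function.Injective f → Function.Injective g →
    p ^ (r - 1) ∣ (S.submatrix f g).det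

theorem dvdInv_one {m : ℕ} (S : Matrix (Fin m) (Fin m) ℤ) : DvdInv m S 1 := by
  intro r f g _ _; simp

theorem dvdInv_reindex {m : ℕ} {S : Matrix (Fin m) (Fin m) ℤ} {p : ℤ}
    (h : DvdInv m S p) (u v : Fin m → Fin m)
    (hu : Function.Injective u) (hv : Function.Injective v) :
    DvdInv m (S.submatrix u v) p := by
  intro r f g hf hg
  rw [Matrix.submatrix_submatrix]
  exact h r _ _ (hu.comp hf) (hv.comp hg)

theorem dvd_chio {m : ℕ} {S : Matrix (Fin (m+1)) (Fin (m+1)) ℤ} {p : ℤ}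
    (hS : DvdInv (m+1) S p) (i j : Fin m) : p ∣ chioM S i j := by
  have hf : Function.Injective (![0, i.succ] : Fin 2 → Fin (m+1)) := by
    intro a b hab
    fin_cases a <;> fin_cases b <;> simp_all [Fin.succ_ne_zero, (Fin.succ_ne_zero i).symm]
  have hg : Function.Injective (![0, j.succ] : Fin 2 → Fin (m+1)) := by
    intro a b hab
    fin_cases a <;> fin_cases b <;> simp_all [Fin.succ_ne_zero, (Fin.succ_ne_zero j).symm]
  have := hS 2 ![0, i.succ] ![0, j.succ] hf hg
  rw [Matrix.det_fin_two] at this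
  simp only [Matrix.submatrix_apply] at this
  simpa [chioM, mul_comm, sub_eq_add_neg, show (2:ℕ) - 1 = 1 from rfl] using this

theorem cases_injective {r m : ℕ} (f : Fin r → Fin m) (hf : Function.Injective f) :
    Function.Injective (Fin.cases (0 : Fin (m+1)) (Fin.succ ∘ f)) := by
  intro a b hab
  induction a using Fin.cases <;> induction b using Fin.cases <;>
    simp_all [Fin.succ_ne_zero, (Fin.succ_ne_zero _).symm, Fin.succ_inj]
  exact hf hab

theorem submatrix_chio {m r : ℕ} (S : Matrix (Fin (m+1)) (Fin (m+1)) ℤ)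
    (f g : Fin r → Fin m) :
    (chioM S).submatrix f g
      = chioM (S.submatrix (Fin.cases 0 (Fin.succ ∘ f)) (Fin.cases 0 (Fin.succ ∘ g))) := by
  funext i j
  simp [chioM, Matrix.submatrix_apply]

theorem dvdInv_step {m : ℕ} {S : Matrix (Fin (m+1)) (Fin (m+1)) ℤ} {p : ℤ}
    (hp : p ≠ 0) (hq : S 0 0 ≠ 0) (hS : DvdInv (m+1) S p) :
    DvdInv m (fun i j => chioM S i j / p) (S 0 0) := by
  have hPT : (fun i j => p * (chioM S i j / p)) = chioM S := by
    funext i j; exact Int.mul_ediv_cancel' (dvd_chio hS i j)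
  intro r f g hf hg
  cases r with
  | zero => simp [Matrix.det_fin_zero]
  | succ r =>
    set T : Matrix (Fin m) (Fin m) ℤ := fun i j => chioM S i j / p with hT
    set q := S 0 0
    set W := S.submatrix (Fin.cases 0 (Fin.succ ∘ f)) (Fin.cases 0 (Fin.succ ∘ g)) with hW
    have h2 : ((chioM S).submatrix f g).det = p ^ (r+1) * (T.submatrix f g).det := by
      have hsub : (chioM S).submatrix f g = p • (T.submatrix f g) := by
        funext a b
        simp only [Matrix.submatrix_apply, Matrix.smul_apply, smul_eq_mul, hT]
        exact (Int.mul_ediv_cancel' (dvd_chio hS (f a) (g b))).symm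
      rw [hsub, Matrix.det_smul]
      norm_num
    have h3 : ((chioM S).submatrix f g).det = (chioM W).det := by rw [submatrix_chio]
    have h4 : q * (chioM W).det = q ^ (r+1) * W.det := by
      have := chio_det W
      simpa [hW] using this
    obtain ⟨w, hw⟩ : p ^ (r+1) ∣ W.det := by
      have := hS (r+2) _ _ (cases_injective f hf) (cases_injective g hg)
      simpa using this
    have key : q * (T.submatrix f g).det = q * (q ^ r * w) := by
      have hcl : q * (p ^ (r+1) * (T.submatrix f g).det) = q ^ (r+1) * (p ^ (r+1) * w) := by
        rw [← h2, h3, h4, hw]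
      have := mul_right_cancel₀ (pow_ne_zero (r+1) hp)
        (show (q * (T.submatrix f g).det) * p ^ (r+1) = (q * (q ^ r * w)) * p ^ (r+1) by
          ring_nf
          ring_nf at hcl
          linarith [hcl])
      exact this
    have := mul_left_cancel₀ hq key
    exact ⟨w, by simpa using this⟩

theorem det_chio_div {m : ℕ} {S : Matrix (Fin (m+1)) (Fin (m+1)) ℤ} {p : ℤ}
    (hS : DvdInv (m+1) S p) :
    S 0 0 * (p ^ m * Matrix.det (fun i j => chioM S i j / p)) = (S 0 0) ^ m * S.det := by
  have hPT : (fun i j => p * (chioM S i j / p)) = chioM S := by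
    funext i j; exact Int.mul_ediv_cancel' (dvd_chio hS i j)
  have h1 : (chioM S).det = p ^ m * Matrix.det (fun i j => chioM S i j / p) := by
    have hsm : chioM S = p • (Matrix.of fun i j => chioM S i j / p) := by
      funext a b
      simp only [Matrix.smul_apply, smul_eq_mul, Matrix.of_apply]
      exact (Int.mul_ediv_cancel' (dvd_chio hS a b)).symm
    have h5 := congrArg Matrix.det hsm
    rw [Matrix.det_smul] at h5
    simpa using h5
  rw [← h1, chio_det]

theorem floordiv_of_dvd {a b : ℤ} (hb : b ≠ 0) (h : b ∣ a) : PySem.Int.floordiv a b = a / b := by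
  have h0 : PySem.Int.mod a b = 0 := (PySem.Int.mod_eq_zero_iff_dvd a b).mpr h
  have h1 := PySem.Int.floordiv_mul_add_mod a b
  rw [h0, add_zero] at h1
  exact (Int.ediv_eq_of_eq_mul_left hb h1.symm).symm

def goM : (m : ℕ) → Matrix (Fin (m+1)) (Fin (m+1)) ℤ → ℤ → ℤ → ℤ
  | 0, S, sg, _ => sg * S 0 0
  | m+1, S, sg, prev =>
    if S 0 0 = 0 then
      match ((List.finRange (m+1)).map Fin.succ).find? (fun i => S i 0 != 0) with
      | some i =>
          goM m (fun a b => PySem.Int.floordiv (chioM (fun x y => S (Equiv.swap 0 i x) y) a b) prev) (-sg)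
            (S (Equiv.swap 0 i 0) 0)
      | none =>
        match ((List.finRange (m+1)).map Fin.succ).find? (fun j => S 0 j != 0) with
        | some c =>
            goM m (fun a b => PySem.Int.floordiv (chioM (fun x y => S x (Equiv.swap 0 c y)) a b) prev) (-sg)
              (S 0 (Equiv.swap 0 c 0))
        | none => 0
    else goM m (fun a b => PySem.Int.floordiv (chioM S a b) prev) sg (S 0 0)

theorem goM_aux {m : ℕ} (S' : Matrix (Fin (m+2)) (Fin (m+2)) ℤ) (sg prev : ℤ)
    (hprev : prev ≠ 0) (hS' : DvdInv (m+2) S' prev) (hq : S' 0 0 ≠ 0)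
    (IH : ∀ (S : Matrix (Fin (m+1)) (Fin (m+1)) ℤ) (sg prev : ℤ), prev ≠ 0 →
      DvdInv (m+1) S prev → goM m S sg prev * prev ^ m = sg * S.det) :
    goM m (fun a b => PySem.Int.floordiv (chioM S' a b) prev) sg (S' 0 0) * prev ^ (m+1)
      = sg * S'.det := by
  rw [show (fun a b => PySem.Int.floordiv (chioM S' a b) prev)
      = (fun a b => chioM S' a b / prev) from
    funext fun a => funext fun b => floordiv_of_dvd hprev (dvd_chio hS' a b)]
  have hT : DvdInv (m+1) (fun a b => chioM S' a b / prev) (S' 0 0) :=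
    dvdInv_step hprev hq hS'
  have hIH := IH _ sg (S' 0 0) hq hT
  have hdet := det_chio_div (m := m+1) hS'
  set X := goM m (fun a b => chioM S' a b / prev) sg (S' 0 0)
  set q := S' 0 0
  set dT := Matrix.det (fun a b => chioM S' a b / prev : Matrix (Fin (m+1)) (Fin (m+1)) ℤ)
  apply mul_right_cancel₀ (pow_ne_zero (m+1) hq)
  calc X * prev ^ (m+1) * q ^ (m+1)
      = (X * q ^ m) * q * prev ^ (m+1) := by ring
    _ = (sg * dT) * q * prev ^ (m+1) := by rw [hIH]
    _ = sg * (q * (prev ^ (m+1) * dT)) := by ring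
    _ = sg * (q ^ (m+1) * S'.det) := by rw [hdet]
    _ = sg * S'.det * q ^ (m+1) := by ring

theorem goM_det : ∀ (m : ℕ) (S : Matrix (Fin (m+1)) (Fin (m+1)) ℤ) (sg prev : ℤ),
    prev ≠ 0 → DvdInv (m+1) S prev → goM m S sg prev * prev ^ m = sg * S.det := by
  intro m
  induction m with
  | zero => intro S sg prev _ _; simp [goM, Matrix.det_fin_one]
  | succ m IH =>
    intro S sg prev hprev hS
    by_cases h0 : S 0 0 = 0
    · rcases hfr : ((List.finRange (m+1)).map Fin.succ).find? (fun i => S i 0 != 0) with _ | i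
      · rcases hfc : ((List.finRange (m+1)).map Fin.succ).find? (fun j => S 0 j != 0) with _ | c
        · -- first row of S is identically zero: det S = 0
          have hrow : ∀ j, S 0 j = 0 := by
            intro j
            rcases Fin.eq_zero_or_eq_succ j with rfl | ⟨b, rfl⟩
            · exact h0
            · have := List.find?_eq_none.mp hfc b.succ (by simp)
              simpa using this
          have hdet0 : S.det = 0 :=
            Matrix.det_eq_zero_of_row_eq_zero 0 hrow
          simp [goM, h0, hfr, hfc, hdet0]
        · -- column swap
          have hc0 : c ≠ 0 := by
            have := List.mem_of_find?_eq_some hfc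
            simp only [List.mem_map] at this
            obtain ⟨b, _, rfl⟩ := this
            exact Fin.succ_ne_zero b
          have hcnz : S 0 c ≠ 0 := by
            have := List.find?_some hfc
            simpa using this
          have hswap : S 0 (Equiv.swap 0 c 0) ≠ 0 := by
            rwa [Equiv.swap_apply_left]
          set S' : Matrix (Fin (m+2)) (Fin (m+2)) ℤ := fun x y => S x (Equiv.swap 0 c y) with hS'def
          have hS'' : DvdInv (m+2) S' prev := by
            have : S' = S.submatrix id (Equiv.swap 0 c) := by funext a b; simp [hS'def]
            rw [this]
            exact dvdInv_reindex hS _ _ Function.injective_id (Equiv.injective _)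
          have hq' : S' 0 0 ≠ 0 := by simpa [hS'def, Equiv.swap_apply_left] using hcnz
          have haux := goM_aux S' (-sg) prev hprev hS'' hq' IH
          have hdS' : S'.det = -S.det := by
            have := Matrix.det_permute' (Equiv.swap 0 c) S
            rw [Equiv.Perm.sign_swap (Ne.symm hc0)] at this
            simpa [hS'def] using this
          rw [show goM (m+1) S sg prev
              = goM m (fun a b => PySem.Int.floordiv (chioM S' a b) prev) (-sg)
                  (S 0 (Equiv.swap 0 c 0)) by
            simp [goM, h0, hfr, hfc, hS'def]]
          rw [show S 0 (Equiv.swap 0 c 0) = S' 0 0 by simp [hS'def]]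
          rw [haux, hdS']
          ring
      · -- row swap
        have hi0 : i ≠ 0 := by
          have := List.mem_of_find?_eq_some hfr
          simp only [List.mem_map] at this
          obtain ⟨b, _, rfl⟩ := this
          exact Fin.succ_ne_zero b
        have hinz : S i 0 ≠ 0 := by
          have := List.find?_some hfr
          simpa using this
        set S' : Matrix (Fin (m+2)) (Fin (m+2)) ℤ := fun x y => S (Equiv.swap 0 i x) y with hS'def
        have hS'' : DvdInv (m+2) S' prev := by
          have : S' = S.submatrix (Equiv.swap 0 i) id := by funext a b; simp [hS'def]
          rw [this]
          exact dvdInv_reindex hS _ _ (Equiv.injective _) Function.injective_id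
        have hq' : S' 0 0 ≠ 0 := by simpa [hS'def, Equiv.swap_apply_left] using hinz
        have haux := goM_aux S' (-sg) prev hprev hS'' hq' IH
        have hdS' : S'.det = -S.det := by
          have := Matrix.det_permute (Equiv.swap 0 i) S
          rw [Equiv.Perm.sign_swap (Ne.symm hi0)] at this
          simpa [hS'def] using this
        rw [show goM (m+1) S sg prev
            = goM m (fun a b => PySem.Int.floordiv (chioM S' a b) prev) (-sg)
                (S (Equiv.swap 0 i 0) 0) by
          simp [goM, h0, hfr, hS'def]]
        rw [show S (Equiv.swap 0 i 0) 0 = S' 0 0 by simp [hS'def]]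
        rw [haux, hdS']
        ring
    · rw [show goM (m+1) S sg prev
          = goM m (fun a b => PySem.Int.floordiv (chioM S a b) prev) sg (S 0 0) by
        simp [goM, h0]]
      exact goM_aux S sg prev hprev hS h0 IH

def MzB (mat : List (List Int)) (i : ℕ) (cols : List ℕ) :
    Matrix (Fin cols.length) (Fin cols.length) ℤ :=
  fun a b => pvGetE mat (i + a) (cols.getD b 0)

theorem det_cast {a b : ℕ} (h : a = b) (M : Matrix (Fin b) (Fin b) ℤ) :
    (M.submatrix (Fin.cast h) (Fin.cast h)).det = M.det :=
  Matrix.det_submatrix_equiv_self (finCongr h) M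

theorem scanB_sum (mat : List (List Int)) (i : ℕ) :
    ∀ (post : List ℕ) (sg : ℤ) (pre : List ℕ),
      scanB mat i sg pre post
        = ∑ t ∈ Finset.range post.length,
            sg * (-1) ^ t * pvGetE mat i (post.getD t 0)
              * expandB mat (i+1) (pre ++ post.eraseIdx t) := by
  intro post
  induction post with
  | nil => intro sg pre; simp [scanB]
  | cons c rest IHp =>
    intro sg pre
    rw [scanB, IHp]
    simp only [List.length_cons]
    rw [Finset.sum_range_succ']
    rw [add_comm]
    congr 1
    · apply Finset.sum_congr rfl
      intro t _
      rw [List.eraseIdx_cons_succ, ← List.append_cons]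
      simp only [List.getD_cons_succ]
      ring_nf
    · simp

theorem getD_eraseIdx (l : List ℕ) (tv bv : ℕ) (ht : tv < l.length) (hb : bv + 1 < l.length) :
    (l.eraseIdx tv).getD bv 0 = if bv < tv then l.getD bv 0 else l.getD (bv+1) 0 := by
  have hblen : bv < (l.eraseIdx tv).length := by
    rw [List.length_eraseIdx_of_lt ht]; omega
  rw [List.getD_eq_getElem _ _ hblen]
  rw [List.getElem_eraseIdx]
  split_ifs with hbt
  · rw [List.getD_eq_getElem _ _ (by omega)]
  · rw [List.getD_eq_getElem _ _ hb]

theorem val_succAbove {n : ℕ} (t : Fin (n+1)) (b : Fin n) :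
    (t.succAbove b : ℕ) = if (b : ℕ) < (t : ℕ) then (b : ℕ) else (b : ℕ) + 1 := by
  by_cases hbt : (b : ℕ) < (t : ℕ)
  · rw [Fin.succAbove_of_castSucc_lt _ _ (by simpa [Fin.lt_def] using hbt)]
    simp [hbt]
  · rw [Fin.succAbove_of_le_castSucc _ _ (by simpa [Fin.le_def] using Nat.le_of_not_lt hbt)]
    simp [hbt]

theorem expandB_det (mat : List (List Int)) :
    ∀ (L : ℕ) (cols : List ℕ) (i : ℕ), cols.length = L →
      expandB mat i cols = (MzB mat i cols).det := by
  intro L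
  induction L with
  | zero =>
    intro cols i h
    rw [List.length_eq_zero_iff] at h; subst h
    rw [expandB]
    exact (Matrix.det_fin_zero).symm
  | succ L IH =>
    intro cols i h
    cases cols with
    | nil => simp at h
    | cons c cs =>
      set M0 : Matrix (Fin (cs.length+1)) (Fin (cs.length+1)) ℤ :=
        (fun a b => pvGetE mat (i + a) ((c :: cs).getD b 0)) with hM0
      have hd : (MzB mat i (c :: cs)).det = M0.det := rfl
      rw [expandB, scanB_sum, hd, Matrix.det_succ_row_zero]
      simp only [List.length_cons]
      rw [Finset.sum_range]
      apply Finset.sum_congr rfl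
      intro t _
      simp only [List.nil_append, one_mul]
      have hcs : cs.length = L := by simpa using h
      have htl : (t : ℕ) < (c :: cs).length := by simp; omega
      have hlen : ((c :: cs).eraseIdx (t : ℕ)).length = L := by
        rw [List.length_eraseIdx_of_lt htl]; simpa using h
      rw [IH _ _ hlen]
      have h1 : cs.length = ((c :: cs).eraseIdx (t : ℕ)).length := by omega
      rw [← det_cast h1 (MzB mat (i+1) ((c :: cs).eraseIdx (t : ℕ)))]
      have hsub : ((MzB mat (i+1) ((c :: cs).eraseIdx (t : ℕ))).submatrix (Fin.cast h1) (Fin.cast h1))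
          = (M0.submatrix Fin.succ t.succAbove) := by
        funext a b
        simp only [Matrix.submatrix_apply, MzB, Fin.val_cast, Fin.val_succ, hM0]
        rw [getD_eraseIdx _ _ _ htl (by simp only [List.length_cons]; omega)]
        rw [val_succAbove]
        rw [show i + 1 + (a:ℕ) = i + ((a:ℕ) + 1) by omega]
        congr 1
        split_ifs <;> rfl
      rw [hsub]
      simp [hM0]

def Rect (n : ℕ) (A : List (List Int)) : Prop :=
  A.length = n ∧ ∀ t, t < n → n ≤ (A.getD t []).length

theorem getD_set_self {A : List (List Int)} {i : ℕ} (hi : i < A.length) (r : List Int) :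
    (A.set i r).getD i [] = r := by
  simp [List.getD, List.getElem?_set_self, hi]

theorem getD_set_ne {A : List (List Int)} {i t : ℕ} (h : i ≠ t) (r : List Int) :
    (A.set i r).getD t [] = A.getD t [] := by
  simp [List.getD, List.getElem?_set_ne h]

theorem getE_setE_same {A : List (List Int)} {i j : ℕ}
    (hi : i < A.length) (hj : j < (A.getD i []).length) (v : Int) :
    pvGetE (pvSetE A i j v) i j = v := by
  have hj' : j < ((A.getD i []).set j v).length := by simpa using hj
  simp only [pvGetE, pvSetE, List.getD_eq_getElem?_getD]
  rw [List.getElem?_set_self hi, Option.getD_some, List.getElem?_set_self (by simpa using hj),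
    Option.getD_some]

theorem getE_setE_ne {A : List (List Int)} {i j i' j' : ℕ}
    (h : i ≠ i' ∨ j ≠ j') (v : Int) :
    pvGetE (pvSetE A i j v) i' j' = pvGetE A i' j' := by
  by_cases hii : i = i'
  · subst hii
    have hjj : j ≠ j' := by tauto
    by_cases hlen : i < A.length
    · simp only [pvGetE, pvSetE, List.getD_eq_getElem?_getD]
      rw [List.getElem?_set_self hlen, Option.getD_some, List.getElem?_set_ne hjj]
    · rw [pvSetE, List.set_eq_of_length_le (by omega)]
  · simp only [pvGetE, pvSetE, List.getD_eq_getElem?_getD]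
    rw [List.getElem?_set_ne hii]

theorem Rect_setE {n : ℕ} {A : List (List Int)} (h : Rect n A) (i j : ℕ) (v : Int) :
    Rect n (pvSetE A i j v) := by
  obtain ⟨hlen, hrow⟩ := h
  refine ⟨by simp [pvSetE, hlen], ?_⟩
  intro t ht
  by_cases hit : i = t
  · subst hit
    by_cases hlt : i < A.length
    · rw [pvSetE, getD_set_self hlt]
      simpa using hrow i ht
    · rw [pvSetE, List.set_eq_of_length_le (by omega)]
      exact hrow i ht
  · rw [pvSetE, getD_set_ne hit]
    exact hrow t ht

theorem Rect_foldl {n : ℕ} {α : Type} {f : List (List Int) → α → List (List Int)}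
    (hf : ∀ B x, Rect n B → Rect n (f B x)) :
    ∀ (l : List α) (A : List (List Int)), Rect n A → Rect n (l.foldl f A) := by
  intro l
  induction l with
  | nil => intro A hA; simpa using hA
  | cons x xs IH => intro A hA; exact IH _ (hf A x hA)

theorem getE_swapRows {A : List (List Int)} {i j : ℕ}
    (hij : i ≠ j) (hiA : i < A.length) (hjA : j < A.length) (t c : ℕ) :
    pvGetE (pvSwapRows A i j) t c
      = pvGetE A (if t = i then j else if t = j then i else t) c := by
  simp only [pvGetE, pvSwapRows, List.getD_eq_getElem?_getD]
  by_cases hti : t = i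
  · subst hti
    rw [List.getElem?_set_ne (Ne.symm hij), List.getElem?_set_self hiA]
    simp [hij]
  · by_cases htj : t = j
    · subst htj
      rw [List.getElem?_set_self (by simpa using hjA)]
      simp [hti]
    · rw [List.getElem?_set_ne (fun h => htj h.symm), List.getElem?_set_ne (fun h => hti h.symm)]
      simp [hti, htj]

theorem Rect_swapRows {n : ℕ} {A : List (List Int)} (h : Rect n A) {i j : ℕ}
    (hi : i < n) (hj : j < n) : Rect n (pvSwapRows A i j) := by
  obtain ⟨hlen, hrow⟩ := h
  refine ⟨by simp [pvSwapRows, hlen], ?_⟩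
  intro t ht
  rw [pvSwapRows]
  by_cases htj : t = j
  · subst htj
    rw [getD_set_self (by simp [hlen]; omega)]
    exact hrow i hi
  · rw [getD_set_ne (fun h => htj h.symm)]
    by_cases hti : t = i
    · subst hti
      rw [getD_set_self (by omega)]
      exact hrow j hj
    · rw [getD_set_ne (fun h => hti h.symm)]
      exact hrow t ht

theorem rowlen_setE (A : List (List Int)) (i j : ℕ) (v : Int) (t : ℕ) :
    ((pvSetE A i j v).getD t []).length = (A.getD t []).length := by
  by_cases hit : i = t
  · subst hit
    by_cases hlen : i < A.length
    · rw [pvSetE, getD_set_self hlen]; simp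
    · rw [pvSetE, List.set_eq_of_length_le (by omega)]
  · rw [pvSetE, getD_set_ne hit]

theorem length_setE (A : List (List Int)) (i j : ℕ) (v : Int) :
    (pvSetE A i j v).length = A.length := by simp [pvSetE]

theorem getE_swapColsFold {c1 c2 : ℕ} (hcc : c1 ≠ c2) :
    ∀ (l : List ℕ) (A : List (List Int)), l.Nodup →
    (∀ x ∈ l, x < A.length ∧ c1 < (A.getD x []).length ∧ c2 < (A.getD x []).length) →
    ∀ r c, pvGetE (l.foldl (fun B r =>
        pvSetE (pvSetE B r c1 (pvGetE B r c2)) r c2 (pvGetE B r c1)) A) r c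
      = if r ∈ l then
          (if c = c1 then pvGetE A r c2 else if c = c2 then pvGetE A r c1 else pvGetE A r c)
        else pvGetE A r c := by
  intro l
  induction l with
  | nil => intro A _ _ r c; simp
  | cons x xs IH =>
    intro A hnd hcond r c
    obtain ⟨hxA, hx1, hx2⟩ := hcond x (by simp)
    have hnd' := (List.nodup_cons.mp hnd).2
    have hxnot := (List.nodup_cons.mp hnd).1
    set A1 := pvSetE (pvSetE A x c1 (pvGetE A x c2)) x c2 (pvGetE A x c1) with hA1
    have hA1len : A1.length = A.length := by rw [hA1, length_setE, length_setE]
    have hA1row : ∀ t, ((A1).getD t []).length = ((A).getD t []).length := by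
      intro t; rw [hA1, rowlen_setE, rowlen_setE]
    have hA1get : ∀ r' c', r' ≠ x →  pvGetE A1 r' c' = pvGetE A r' c' := by
      intro r' c' hr'
      rw [hA1, getE_setE_ne (Or.inl (fun h => hr' h.symm)),
        getE_setE_ne (Or.inl (fun h => hr' h.symm))]
    rw [List.foldl_cons, IH A1 hnd'
      (fun y hy => by
        obtain ⟨h1, h2, h3⟩ := hcond y (by simp [hy])
        exact ⟨by omega, by rw [hA1row]; omega, by rw [hA1row]; omega⟩)]
    by_cases hrx : r = x
    · subst hrx
      have e1 : pvGetE A1 r c1 = pvGetE A r c2 := by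
        rw [hA1, getE_setE_ne (Or.inr hcc.symm),
          getE_setE_same (by first | omega | (simp only [length_setE, rowlen_setE]; omega)) (by first | omega | (simp only [length_setE, rowlen_setE]; omega))]
      have e2 : pvGetE A1 r c2 = pvGetE A r c1 := by
        rw [hA1,
          getE_setE_same (by first | omega | (simp only [length_setE, rowlen_setE]; omega))
            (by first | omega | (simp only [length_setE, rowlen_setE]; omega))]
      have e3 : ∀ c', c' ≠ c1 → c' ≠ c2 → pvGetE A1 r c' = pvGetE A r c' := by
        intro c' h1 h2
        rw [hA1, getE_setE_ne (Or.inr (fun h => h2 h.symm)),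
          getE_setE_ne (Or.inr (fun h => h1 h.symm))]
      by_cases hc1 : c = c1
      · subst hc1; simp [hxnot, e1, hcc]
      · by_cases hc2 : c = c2
        · subst hc2; simp [hxnot, e2, hc1, Ne.symm hcc]
        · simp [hxnot, hc1, hc2, e3 c hc1 hc2]
    · have e0 := hA1get r c hrx
      have e2 := hA1get r c2 hrx
      have e1 := hA1get r c1 hrx
      by_cases hrxs : r ∈ xs
      · simp [hrxs, hrx, e0, e1, e2]
      · simp [hrxs, hrx, e0]

theorem getE_innerElim (f : ℤ → ℤ → ℤ → ℤ) {i k : ℕ} (hik : i ≠ k) :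
    ∀ (l : List ℕ) (A : List (List Int)), l.Nodup → i < A.length →
    (∀ j ∈ l, j ≠ k ∧ j < (A.getD i []).length) →
    ∀ r c, pvGetE (l.foldl (fun C j =>
        pvSetE C i j (f (pvGetE C i j) (pvGetE C i k) (pvGetE C k j))) A) r c
      = if r = i ∧ c ∈ l then f (pvGetE A i c) (pvGetE A i k) (pvGetE A k c)
        else pvGetE A r c := by
  intro l
  induction l with
  | nil => intro A _ _ _ r c; simp
  | cons j0 js IH =>
    intro A hnd hiA hcond r c
    obtain ⟨hj0k, hj0len⟩ := hcond j0 (by simp)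
    have hnd' := (List.nodup_cons.mp hnd).2
    have hj0not := (List.nodup_cons.mp hnd).1
    set A1 := pvSetE A i j0 (f (pvGetE A i j0) (pvGetE A i k) (pvGetE A k j0)) with hA1
    have hg1 : ∀ r' c', r' ≠ i ∨ c' ≠ j0 → pvGetE A1 r' c' = pvGetE A r' c' := by
      intro r' c' h
      rw [hA1, getE_setE_ne (by tauto)]
    rw [List.foldl_cons, IH A1 hnd' (by rw [length_setE]; omega)
      (fun y hy => by
        obtain ⟨h1, h2⟩ := hcond y (by simp [hy])
        exact ⟨h1, by rw [rowlen_setE]; omega⟩)]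
    by_cases hri : r = i
    · subst hri
      by_cases hcj0 : c = j0
      · subst hcj0
        rw [if_neg (by tauto), if_pos ⟨rfl, by simp⟩,
          hA1, getE_setE_same hiA hj0len]
      · by_cases hcjs : c ∈ js
        · rw [if_pos ⟨rfl, hcjs⟩, if_pos ⟨rfl, by simp [hcjs]⟩,
            hg1 r c (Or.inr hcj0), hg1 r k (Or.inr (fun h => hj0k h.symm)),
            hg1 k c (Or.inl (Ne.symm hik))]
        · rw [if_neg (by tauto), if_neg (by simp [hcj0, hcjs]),
            hg1 r c (Or.inr hcj0)]
    · rw [if_neg (by tauto), if_neg (by tauto), hg1 r c (Or.inl hri)]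

theorem getE_zeroRowFold {k : ℕ} :
    ∀ (l : List ℕ) (A : List (List Int)), k < A.length →
    (∀ j ∈ l, j < (A.getD k []).length) →
    ∀ r c, pvGetE (l.foldl (fun B j => pvSetE B k j 0) A) r c
      = if r = k ∧ c ∈ l then 0 else pvGetE A r c := by
  intro l
  induction l with
  | nil => intro A _ _ r c; simp
  | cons j0 js IH =>
    intro A hkA hcond r c
    set A1 := pvSetE A k j0 0 with hA1
    rw [List.foldl_cons, IH A1 (by rw [length_setE]; omega)
      (fun y hy => by rw [rowlen_setE]; exact hcond y (by simp [hy]))]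
    by_cases hrk : r = k
    · subst hrk
      by_cases hcjs : c ∈ js
      · rw [if_pos ⟨rfl, hcjs⟩, if_pos ⟨rfl, by simp [hcjs]⟩]
      · rw [if_neg (by tauto)]
        by_cases hcj0 : c = j0
        · subst hcj0
          rw [if_pos ⟨rfl, by simp⟩, hA1, getE_setE_same hkA (hcond c (by simp))]
        · rw [if_neg (by simp [hcj0, hcjs]), hA1, getE_setE_ne (Or.inr (fun h => hcj0 h.symm))]
    · rw [if_neg (by tauto), if_neg (by tauto), hA1, getE_setE_ne (Or.inl (fun h => hrk h.symm))]

def Sblk (A : List (List Int)) (k m : ℕ) : Matrix (Fin (m+1)) (Fin (m+1)) ℤ :=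
  fun a b => pvGetE A (k + a.val) (k + b.val)

theorem getE_outerElimAux (f : ℤ → ℤ → ℤ → ℤ) {n k : ℕ} (J : List ℕ) (hJnd : J.Nodup)
    (hJ : ∀ j ∈ J, k+1 ≤ j ∧ j < n) :
    ∀ (l : List ℕ) (A : List (List Int)), l.Nodup → Rect n A →
    (∀ x ∈ l, k+1 ≤ x ∧ x < n) →
    ∀ r c, pvGetE (l.foldl (fun B i => pvSetE (J.foldl (fun C j =>
          pvSetE C i j (f (pvGetE C i j) (pvGetE C i k) (pvGetE C k j))) B) i k 0) A) r c
      = if r ∈ l ∧ c = k then 0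
        else if r ∈ l ∧ c ∈ J then f (pvGetE A r c) (pvGetE A r k) (pvGetE A k c)
        else pvGetE A r c := by
  intro l
  induction l with
  | nil => intro A _ _ _ r c; simp
  | cons x xs IH =>
    intro A hnd hR hcond r c
    obtain ⟨hx1, hx2⟩ := hcond x (by simp)
    have hxk : x ≠ k := by omega
    have hnd' := (List.nodup_cons.mp hnd).2
    have hxnot := (List.nodup_cons.mp hnd).1
    obtain ⟨hlen, hrowlen⟩ := hR
    have hinner := getE_innerElim f hxk J A hJnd (by omega)
      (fun j hj => ⟨by have := hJ j hj; omega,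
        by have := hJ j hj; have := hrowlen x (by omega); omega⟩)
    set A0 := J.foldl (fun C j =>
      pvSetE C x j (f (pvGetE C x j) (pvGetE C x k) (pvGetE C k j))) A with hA0
    have hRA0 : Rect n A0 := Rect_foldl (fun B j hB => Rect_setE hB _ _ _) J A ⟨hlen, hrowlen⟩
    set A1 := pvSetE A0 x k 0 with hA1def
    have hRA1 : Rect n A1 := Rect_setE hRA0 _ _ _
    have hA1 : ∀ r' c', pvGetE A1 r' c'
        = if r' = x ∧ c' = k then 0
          else if r' = x ∧ c' ∈ J then f (pvGetE A r' c') (pvGetE A r' k) (pvGetE A k c')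
          else pvGetE A r' c' := by
      intro r' c'
      by_cases hr' : r' = x
      · subst hr'
        by_cases hc' : c' = k
        · subst hc'
          rw [hA1def, getE_setE_same (by have := hRA0.1; omega) (by have := hRA0.2 r' (by omega); omega)]
          simp
        · rw [hA1def, getE_setE_ne (Or.inr (fun h => hc' h.symm)), hA0, hinner]
          by_cases hcJ : c' ∈ J <;> simp [hc', hcJ]
      · rw [hA1def, getE_setE_ne (Or.inl (fun h => hr' h.symm)), hA0, hinner]
        simp [hr']
    rw [List.foldl_cons, ← hA0, ← hA1def,
      IH A1 hnd' hRA1 (fun y hy => hcond y (by simp [hy]))]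
    by_cases hrx : r = x
    · subst hrx
      rw [if_neg (fun h => hxnot h.1), if_neg (fun h => hxnot h.1), hA1]
      by_cases hck : c = k
      · simp [hck]
      · by_cases hcJ : c ∈ J <;> simp [hck, hcJ]
    · have e0 := hA1 r c
      rw [if_neg (by tauto), if_neg (by tauto)] at e0
      have ek := hA1 r k
      rw [if_neg (by tauto), if_neg (by tauto)] at ek
      have ekc := hA1 k c
      rw [if_neg (by tauto), if_neg (by tauto)] at ekc
      simp only [e0, ek, ekc, List.mem_cons, hrx, false_or]

theorem floordiv_one (v : ℤ) : PySem.Int.floordiv v 1 = v := by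
  rw [floordiv_of_dvd one_ne_zero (one_dvd v), Int.ediv_one]

theorem mem_J_iff {k n j : ℕ} (hkn : k < n) :
    j ∈ List.range' (k+1) (n-(k+1)) ↔ k+1 ≤ j ∧ j < n := by
  rw [List.mem_range'_1]
  omega

theorem step_block {n k m : ℕ} {A : List (List Int)} (hR : Rect n A) (hk : k + (m+2) = n)
    (prev : ℤ) (hk0 : k = 0 → prev = 1) :
    Sblk (pvZeroRow (pvElim A n k (pvGetE A k k) prev) n k) (k+1) m
      = fun a b => PySem.Int.floordiv (chioM (Sblk A k (m+1)) a b) prev := by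
  have hkn : k < n := by omega
  set f : ℤ → ℤ → ℤ → ℤ := fun x y z =>
    if 0 < k then PySem.Int.floordiv (x * pvGetE A k k - y * z) prev
    else x * pvGetE A k k - y * z with hf
  have houter := getE_outerElimAux f (List.range' (k+1) (n-(k+1))) (List.nodup_range' _)
    (fun j hj => (mem_J_iff hkn).mp hj) (List.range' (k+1) (n-(k+1))) A
    (List.nodup_range' _) hR (fun j hj => (mem_J_iff hkn).mp hj)
  have hE : pvElim A n k (pvGetE A k k) prev = (List.range' (k+1) (n-(k+1))).foldl
      (fun B i => pvSetE ((List.range' (k+1) (n-(k+1))).foldl (fun C j =>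
        pvSetE C i j (f (pvGetE C i j) (pvGetE C i k) (pvGetE C k j))) B) i k 0) A := rfl
  have hRE : Rect n (pvElim A n k (pvGetE A k k) prev) := by
    rw [hE]
    exact Rect_foldl (fun B x hB =>
      Rect_setE (Rect_foldl (fun C y hC => Rect_setE hC _ _ _) _ _ hB) _ _ _) _ _ hR
  funext a b
  rw [Sblk, pvZeroRow,
    getE_zeroRowFold _ _ (by have := hRE.1; omega)
      (fun j hj => by
        have := hRE.2 k hkn
        have := (mem_J_iff hkn).mp hj
        omega),
    if_neg (by intro h; omega), hE, houter,
    if_neg (by intro h; omega),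
    if_pos ⟨(mem_J_iff hkn).mpr (by omega), (mem_J_iff hkn).mpr (by omega)⟩]
  show f (pvGetE A (k+1+a.val) (k+1+b.val)) (pvGetE A (k+1+a.val) k) (pvGetE A k (k+1+b.val))
      = PySem.Int.floordiv (chioM (Sblk A k (m+1)) a b) prev
  have harg : chioM (Sblk A k (m+1)) a b
      = pvGetE A (k+1+a.val) (k+1+b.val) * pvGetE A k k
        - pvGetE A (k+1+a.val) k * pvGetE A k (k+1+b.val) := by
    rw [chioM]
    show pvGetE A (k+0) (k+0) * pvGetE A (k+(a.val+1)) (k+(b.val+1))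
        - pvGetE A (k+(a.val+1)) (k+0) * pvGetE A (k+0) (k+(b.val+1)) = _
    rw [show k+0 = k by omega, show k+(a.val+1) = k+1+a.val by omega,
      show k+(b.val+1) = k+1+b.val by omega]
    ring
  rw [harg, hf]
  by_cases hkpos : 0 < k
  · simp [hkpos]
  · have hp1 : prev = 1 := hk0 (by omega)
    simp [hkpos, hp1, floordiv_one]

theorem swapRows_block {n k m : ℕ} {A : List (List Int)} (hR : Rect n A)
    (hk : k + (m+2) = n) (bv : ℕ) (hbv : bv < m+1) :
    Sblk (pvSwapRows A k (k+1+bv)) k (m+1)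
      = fun x y => Sblk A k (m+1) (Equiv.swap 0 (Fin.succ ⟨bv, hbv⟩) x) y := by
  funext x y
  rw [Sblk, getE_swapRows (by omega) (by have := hR.1; omega) (by have := hR.1; omega)]
  rcases Fin.eq_zero_or_eq_succ x with rfl | ⟨x', rfl⟩
  · rw [if_pos (by simp), Equiv.swap_apply_left]
    show pvGetE A (k+1+bv) (k + y.val) = pvGetE A (k + (bv+1)) (k + y.val)
    have e : k + (bv+1) = k+1+bv := by omega
    rw [e]
  · by_cases hx' : x' = ⟨bv, hbv⟩
    · subst hx'
      rw [if_neg (by simp only [Fin.val_succ]; omega),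
        if_pos (by simp only [Fin.val_succ]; omega), Equiv.swap_apply_right]
      show pvGetE A (k + 0) (k + y.val) = pvGetE A (k + (0:Fin (m+2)).val) (k + y.val)
      rfl
    · have hvne : x'.val ≠ bv := fun h => hx' (Fin.ext h)
      rw [if_neg (by simp only [Fin.val_succ]; omega),
        if_neg (by simp only [Fin.val_succ]; omega),
        Equiv.swap_apply_of_ne_of_ne (Fin.succ_ne_zero x')
          (by simp only [ne_eq, Fin.succ_inj]; exact hx')]
      rfl

theorem swapCols_block {n k m : ℕ} {A : List (List Int)} (hR : Rect n A)
    (hk : k + (m+2) = n) (bv : ℕ) (hbv : bv < m+1) :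
    Sblk (pvSwapCols A n k (k+1+bv)) k (m+1)
      = fun x y => Sblk A k (m+1) x (Equiv.swap 0 (Fin.succ ⟨bv, hbv⟩) y) := by
  funext x y
  have hxlt := x.isLt
  rw [Sblk, pvSwapCols,
    getE_swapColsFold (by omega) (List.range n) A List.nodup_range
      (fun t ht => by
        rw [List.mem_range] at ht
        exact ⟨by have := hR.1; omega, by have := hR.2 t ht; omega,
          by have := hR.2 t ht; omega⟩),
    if_pos (by rw [List.mem_range]; omega)]
  rcases Fin.eq_zero_or_eq_succ y with rfl | ⟨y', rfl⟩
  · rw [if_pos (by simp), Equiv.swap_apply_left]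
    show pvGetE A (k + x.val) (k+1+bv) = pvGetE A (k + x.val) (k + (bv+1))
    have e : k + (bv+1) = k+1+bv := by omega
    rw [e]
  · by_cases hy' : y' = ⟨bv, hbv⟩
    · subst hy'
      rw [if_neg (by simp only [Fin.val_succ]; omega),
        if_pos (by simp only [Fin.val_succ]; omega), Equiv.swap_apply_right]
      show pvGetE A (k + x.val) (k + 0) = pvGetE A (k + x.val) (k + (0:Fin (m+2)).val)
      rfl
    · have hvne : y'.val ≠ bv := fun h => hy' (Fin.ext h)
      rw [if_neg (by simp only [Fin.val_succ]; omega),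
        if_neg (by simp only [Fin.val_succ]; omega),
        Equiv.swap_apply_of_ne_of_ne (Fin.succ_ne_zero y')
          (by simp only [ne_eq, Fin.succ_inj]; exact hy')]
      rfl

theorem find?_shift (k m : ℕ) (p : ℕ → Bool) :
    (List.range' (k+1) (m+1)).find? p
      = ((List.finRange (m+1)).find? (fun b => p (k+1+b.val))).map (fun b => k+1+b.val) := by
  rw [List.range'_eq_map_range, ← List.map_coe_finRange_eq_range, List.map_map, List.find?_map]
  rfl

theorem Rect_elimZero {n k : ℕ} {A : List (List Int)} (hR : Rect n A) (piv prev : ℤ) :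
    Rect n (pvZeroRow (pvElim A n k piv prev) n k) := by
  unfold pvZeroRow pvElim
  exact Rect_foldl (fun B x hB => Rect_setE hB _ _ _) _ _
    (Rect_foldl (fun B x hB =>
      Rect_setE (Rect_foldl (fun C y hC => Rect_setE hC _ _ _) _ _ hB) _ _ _) _ _ hR)

theorem Rect_swapCols {n : ℕ} {A : List (List Int)} (hR : Rect n A) (c1 c2 : ℕ) :
    Rect n (pvSwapCols A n c1 c2) := by
  unfold pvSwapCols
  exact Rect_foldl (fun B x hB => Rect_setE (Rect_setE hB _ _ _) _ _ _) _ _ hR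

theorem bridge (n : ℕ) : ∀ (m k : ℕ) (A : List (List Int)) (sg prev : ℤ),
    Rect n A → k + (m+1) = n → (k = 0 → prev = 1) →
    detLoop n k A sg prev = goM m (Sblk A k m) sg prev := by
  intro m
  induction m with
  | zero =>
    intro k A sg prev hR hk hk0
    rw [detLoop, dif_neg (by omega), goM]
    show sg * pvGetE A (n-1) (n-1) = sg * pvGetE A (k + (0:Fin 1).val) (k + (0:Fin 1).val)
    rw [show k + (0:Fin 1).val = n-1 by simp only [Fin.val_zero]; omega]
  | succ m IH =>
    intro k A sg prev hR hk hk0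
    have hklt : k < n - 1 := by omega
    have hnk1 : n - (k+1) = m+1 := by omega
    set S := Sblk A k (m+1) with hS
    have hS00 : pvGetE A k k = S 0 0 := by
      rw [hS]
      show _ = pvGetE A (k + (0:Fin (m+2)).val) (k + (0:Fin (m+2)).val)
      simp
    have hpredrow : (fun b : Fin (m+1) => (pvGetE A (k+1+b.val) k != 0))
        = (fun b : Fin (m+1) => (S b.succ 0 != 0)) := by
      funext b
      rw [hS]
      show _ = (pvGetE A (k + b.succ.val) (k + (0:Fin (m+2)).val) != 0)
      rw [show k + b.succ.val = k+1+b.val by simp only [Fin.val_succ]; omega,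
        show k + (0:Fin (m+2)).val = k by simp]
    have hpredcol : (fun b : Fin (m+1) => (pvGetE A k (k+1+b.val) != 0))
        = (fun b : Fin (m+1) => (S 0 b.succ != 0)) := by
      funext b
      rw [hS]
      show _ = (pvGetE A (k + (0:Fin (m+2)).val) (k + b.succ.val) != 0)
      rw [show k + b.succ.val = k+1+b.val by simp only [Fin.val_succ]; omega,
        show k + (0:Fin (m+2)).val = k by simp]
    have hmfr : ((List.finRange (m+1)).map Fin.succ).find? (fun i => S i 0 != 0)
        = ((List.finRange (m+1)).find? (fun b => pvGetE A (k+1+b.val) k != 0)).map Fin.succ := by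
      rw [List.find?_map, hpredrow]; rfl
    have hmfc : ((List.finRange (m+1)).map Fin.succ).find? (fun j => S 0 j != 0)
        = ((List.finRange (m+1)).find? (fun b => pvGetE A k (k+1+b.val) != 0)).map Fin.succ := by
      rw [List.find?_map, hpredcol]; rfl
    rw [detLoop, dif_pos hklt, hnk1,
      find?_shift k m (fun i => pvGetE A i k != 0),
      find?_shift k m (fun j => pvGetE A k j != 0)]
    by_cases h0 : pvGetE A k k = 0
    · rw [if_pos h0]
      rcases hfr : (List.finRange (m+1)).find? (fun b : Fin (m+1) => pvGetE A (k+1+b.val) k != 0)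
        with _ | b
      · rcases hfc : (List.finRange (m+1)).find? (fun b : Fin (m+1) => pvGetE A k (k+1+b.val) != 0)
          with _ | b
        · -- no pivot anywhere: both return 0
          rw [show goM (m+1) S sg prev = 0 by
            simp [goM, hS00 ▸ h0, hmfr, hmfc, hfr, hfc]]
          simp [hfr, hfc]
        · -- column swap
          simp only [hfr, hfc, Option.map_none, Option.map_some]
          rw [show goM (m+1) S sg prev
              = goM m (fun u v => PySem.Int.floordiv
                  (chioM (fun x y => S x (Equiv.swap 0 b.succ y)) u v) prev) (-sg)
                (S 0 (Equiv.swap 0 b.succ 0)) by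
            simp [goM, hS00 ▸ h0, hmfr, hmfc, hfr, hfc]]
          have hRA' : Rect n (pvSwapCols A n k (k+1+b.val)) := Rect_swapCols hR _ _
          have hblk : Sblk (pvSwapCols A n k (k+1+b.val)) k (m+1)
              = fun x y => S x (Equiv.swap 0 b.succ y) := by
            rw [hS, swapCols_block hR (by omega) b.val b.isLt]
          have hpiv : pvGetE (pvSwapCols A n k (k+1+b.val)) k k
              = S 0 (Equiv.swap 0 b.succ 0) := by
            have := congrFun (congrFun hblk 0) 0
            rw [Sblk] at this
            simpa using this
          rw [IH (k+1)
              (pvZeroRow (pvElim (pvSwapCols A n k (k+1+b.val)) n k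
                (pvGetE (pvSwapCols A n k (k+1+b.val)) k k) prev) n k)
              (-sg) (pvGetE (pvSwapCols A n k (k+1+b.val)) k k)
              (Rect_elimZero hRA' _ _) (by omega) (fun h => absurd h (by omega)),
            step_block hRA' (by omega) prev hk0, hblk, hpiv]
      · -- row swap
        simp only [hfr, Option.map_some]
        rw [show goM (m+1) S sg prev
            = goM m (fun u v => PySem.Int.floordiv
                (chioM (fun x y => S (Equiv.swap 0 b.succ x) y) u v) prev) (-sg)
              (S (Equiv.swap 0 b.succ 0) 0) by
          simp [goM, hS00 ▸ h0, hmfr, hfr]]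
        have hRA' : Rect n (pvSwapRows A k (k+1+b.val)) :=
          Rect_swapRows hR (by omega) (by have := b.isLt; omega)
        have hblk : Sblk (pvSwapRows A k (k+1+b.val)) k (m+1)
            = fun x y => S (Equiv.swap 0 b.succ x) y := by
          rw [hS, swapRows_block hR (by omega) b.val b.isLt]
        have hpiv : pvGetE (pvSwapRows A k (k+1+b.val)) k k
            = S (Equiv.swap 0 b.succ 0) 0 := by
          have := congrFun (congrFun hblk 0) 0
          rw [Sblk] at this
          simpa using this
        rw [IH (k+1)
            (pvZeroRow (pvElim (pvSwapRows A k (k+1+b.val)) n k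
              (pvGetE (pvSwapRows A k (k+1+b.val)) k k) prev) n k)
            (-sg) (pvGetE (pvSwapRows A k (k+1+b.val)) k k)
            (Rect_elimZero hRA' _ _) (by omega) (fun h => absurd h (by omega)),
          step_block hRA' (by omega) prev hk0, hblk, hpiv]
    · rw [if_neg h0]
      rw [show goM (m+1) S sg prev
          = goM m (fun a b => PySem.Int.floordiv (chioM S a b) prev) sg (S 0 0) by
        simp [goM, hS00 ▸ h0]]
      rw [IH (k+1)
          (pvZeroRow (pvElim A n k (pvGetE A k k) prev) n k)
          sg (pvGetE A k k)
          (Rect_elimZero hR _ _) (by omega) (fun h => absurd h (by omega)),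
        step_block hR (by omega) prev hk0, hS00]

theorem det_bareiss_final : ∀ (mat : List (List Int)), Pre_det_bareiss_py mat →
    det_bareiss_py mat = det_bareiss_py_alt mat := by
  intro mat hpre
  rcases hn : mat.length with _ | m
  · rw [det_bareiss_py, if_pos hn, det_bareiss_py_alt, hn,
      show List.range 0 = [] from rfl, expandB]
  · have hR : Rect mat.length mat := by
      refine ⟨rfl, ?_⟩
      intro t ht
      rw [List.getD_eq_getElem _ _ ht]
      exact hpre _ (List.getElem_mem ht)
    rw [det_bareiss_py, if_neg (by omega), List.map_id']
    have hb := bridge mat.length m 0 mat 1 1 hR (by omega) (fun _ => rfl)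
    rw [show detLoop mat.length 0 mat 1 1 = detLoop mat.length 0 mat 1 1 from rfl, hb]
    have hgd := goM_det m (Sblk mat 0 m) 1 1 one_ne_zero (dvdInv_one _)
    rw [one_pow, mul_one, one_mul] at hgd
    rw [hgd]
    -- B side
    rw [det_bareiss_py_alt, hn,
      expandB_det mat (m+1) (List.range (m+1)) 0 (List.length_range)]
    have hcast : (m+1) = (List.range (m+1)).length := (List.length_range).symm
    rw [← det_cast hcast (MzB mat 0 (List.range (m+1)))]
    congr 1
    funext a b
    simp only [Matrix.submatrix_apply, MzB, Sblk, Fin.val_cast]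
    rw [List.getD_eq_getElem _ _ (by rw [List.length_range]; exact b.isLt),
      List.getElem_range]
    simp

-- ===== VERDICT (by name: the statement is the Claim_ definition above) =====
theorem det_bareiss_py_spec : Claim_equal_det_bareiss_py :=
  fun mat _ hpre => det_bareiss_final mat hpre
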